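-- pv_equiv track=rewrite | github.com/benhsu0828/FCU-Speech-Recognition-and-NLP | HW3/src/FNNeval.py | find_predicted_ranges
-- ===== SOURCE A (Python) =====
-- def find_predicted_ranges(predictions, hop_length):
--     ranges = []
--     start = None
--     for i, pred in enumerate(predictions):
--         if pred == 1 and start is None:
--             start = i * hop_length
--         elif pred == 0 and start is not None:
--             ranges.append((start, (i - 1) * hop_length))
--             start = None
--     if start is not None:
--         ranges.append((start, (len(predictions) - 1) * hop_length))
--     return ranges
-- ===== SOURCE B (Python) =====
-- def find_predicted_ranges(predictions, hop_length):
--     # Pass 1: forward-fill a boolean mask: covered[i] iff the most recent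
--     # prediction equal to 0 or 1 (at or before i) was a 1.
--     covered = []
--     cur = False
--     for p in predictions:
--         cur = True if p == 1 else (False if p == 0 else cur)
--         covered.append(cur)
--     # Pass 2: emit maximal runs of True in the mask.
--     ranges = []
--     i = 0
--     n = len(covered)
--     while i < n:
--         if not covered[i]:
--             i += 1
--             continue
--         j = i
--         while j < n and covered[j]:
--             j += 1
--         ranges.append((i * hop_length, (j - 1) * hop_length))
--         i = j
--     return ranges
-- ===== Notes on version B (the rewrite author's own statement) =====
-- stated objective: alternative
-- what changed: Replaces A's single stateful open/close scan with a two-pass decomposition: first forward-fill a boolean covered mask (last decisive 0/1 value), then find maximal runs of True in the mask and emit (start*hop, end*hop) per run.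
import Mathlib
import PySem

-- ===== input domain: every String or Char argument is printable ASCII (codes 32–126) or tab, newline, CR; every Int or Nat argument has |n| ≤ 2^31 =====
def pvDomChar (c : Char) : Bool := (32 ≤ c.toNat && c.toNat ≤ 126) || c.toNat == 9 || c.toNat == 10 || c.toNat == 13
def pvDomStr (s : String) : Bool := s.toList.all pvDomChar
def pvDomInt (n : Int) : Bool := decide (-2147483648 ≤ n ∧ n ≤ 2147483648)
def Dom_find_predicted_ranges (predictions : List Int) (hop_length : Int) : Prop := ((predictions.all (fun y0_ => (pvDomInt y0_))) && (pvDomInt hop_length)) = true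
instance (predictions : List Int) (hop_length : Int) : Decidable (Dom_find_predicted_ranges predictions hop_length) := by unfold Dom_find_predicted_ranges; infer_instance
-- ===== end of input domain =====

-- B replaces A's open/close state flag by a forward-filled boolean mask built in one
-- pass plus a separate maximal-run finder (objective: alternative decomposition).

-- ===== PORT A =====
-- the for loop of A, as structural recursion over the list carrying (i, ranges, start)
def pvALoop (hop : Int) : List Int → Nat → List (Int × Int) → Option Int → List (Int × Int) × Option Int
  | [], _, ranges, start => (ranges, start)
  | p :: rest, i, ranges, start =>
    if p = 1 ∧ start = none then
      pvALoop hop rest (i + 1) ranges (some ((i : Int) * hop))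
    else if p = 0 ∧ start ≠ none then
      pvALoop hop rest (i + 1) (ranges ++ [(start.getD 0, ((i : Int) - 1) * hop)]) none
    else
      pvALoop hop rest (i + 1) ranges start

def find_predicted_ranges (predictions : List Int) (hop_length : Int) : List (Int × Int) :=
  match pvALoop hop_length predictions 0 [] none with
  | (ranges, none) => ranges
  | (ranges, some s) => ranges ++ [(s, ((predictions.length : Int) - 1) * hop_length)]

-- ===== PORT B =====
-- pass 1 of Source B: forward-filled mask
def pvCovered (cur : Bool) : List Int → List Bool
  | [] => []
  | p :: rest =>
    let c := if p = 1 then true else if p = 0 then false else cur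
    c :: pvCovered c rest

-- inner while loop of Source B: length of the leading run of True
def pvLeadTrue : List Bool → Nat
  | true :: rest => pvLeadTrue rest + 1
  | _ => 0

-- outer while loop of Source B: scan the mask for maximal runs of True (i is the index
-- of the head of the remaining mask; Python keeps the full list and indexes instead)
def pvRuns (hop : Int) : List Bool → Nat → List (Int × Int) → List (Int × Int)
  | [], _, ranges => ranges
  | false :: rest, i, ranges => pvRuns hop rest (i + 1) ranges
  | true :: rest, i, ranges =>
    let k := pvLeadTrue rest + 1
    pvRuns hop (rest.drop (k - 1)) (i + k)
      (ranges ++ [((i : Int) * hop, ((i : Int) + (k : Int) - 1) * hop)])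
  termination_by l _ _ => l.length
  decreasing_by
    · simp
    · simp only [List.length_drop, List.length_cons]; omega

def find_predicted_ranges_alt (predictions : List Int) (hop_length : Int) : List (Int × Int) :=
  pvRuns hop_length (pvCovered false predictions) 0 []

-- ===== PRECONDITION & SPEC =====
def Spec_find_predicted_ranges (predictions : List Int) (hop_length : Int) (out : List (Int × Int)) : Prop := out = find_predicted_ranges_alt predictions hop_length
instance (predictions : List Int) (hop_length : Int) (out : List (Int × Int)) : Decidable (Spec_find_predicted_ranges predictions hop_length out) := by unfold Spec_find_predicted_ranges; infer_instance

-- ===== CLAIM (what is proved, stated in full; the proofs are below) =====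
def Claim_equal_find_predicted_ranges : Prop := ∀ (predictions : List Int) (hop_length : Int), Dom_find_predicted_ranges predictions hop_length → Spec_find_predicted_ranges predictions hop_length (find_predicted_ranges predictions hop_length)

-- ===== LEMMAS AND PROOFS =====

-- A's result including the trailing-open-run append, from an arbitrary mid-loop state;
-- n is the total number of predictions (kept fixed across loop steps)
def pvAOut (hop : Int) (rest : List Int) (i : Nat) (ranges : List (Int × Int)) (start : Option Int) (n : Int) : List (Int × Int) :=
  match pvALoop hop rest i ranges start with
  | (r, none) => r
  | (r, some s) => r ++ [(s, (n - 1) * hop)]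

theorem pvMain (hop : Int) (rest : List Int) : ∀ (i : Nat) (ranges : List (Int × Int)) (n : Int),
    n = i + rest.length →
    (pvAOut hop rest i ranges none n = pvRuns hop (pvCovered false rest) i ranges) ∧
    (∀ s : Int, pvAOut hop rest i ranges (some s) n =
      pvRuns hop ((pvCovered true rest).drop (pvLeadTrue (pvCovered true rest))) (i + pvLeadTrue (pvCovered true rest))
        (ranges ++ [(s, ((i : Int) + (pvLeadTrue (pvCovered true rest) : Int) - 1) * hop)])) := by
  induction rest with
  | nil =>
    intro i ranges n hn
    constructor
    · simp [pvAOut, pvALoop, pvCovered, pvRuns]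
    · intro s
      simp only [List.length_nil, Nat.cast_zero, add_zero] at hn
      subst hn
      simp only [pvAOut, pvALoop, pvCovered, pvLeadTrue, List.drop_nil, pvRuns,
        Nat.cast_zero, List.append_cancel_left_eq, List.cons.injEq, Prod.mk.injEq]
      refine ⟨⟨trivial, by ring⟩, trivial⟩
  | cons p r ih =>
    intro i ranges n hn
    have hn' : n = (i + 1 : Nat) + r.length := by simp at hn ⊢; omega
    constructor
    · by_cases h1 : p = 1
      · -- open a run at i
        have h2 : pvCovered false (p :: r) = true :: pvCovered true r := by
          simp [pvCovered, h1]
        have hA : pvAOut hop (p :: r) i ranges none n = pvAOut hop r (i + 1) ranges (some ((i : Int) * hop)) n := by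
          simp [pvAOut, pvALoop, h1]
        rw [hA, ((ih (i + 1) ranges n hn').2 ((i : Int) * hop)), h2]
        simp only [pvRuns]
        have e1 : i + 1 + pvLeadTrue (pvCovered true r) = i + (pvLeadTrue (pvCovered true r) + 1) := by omega
        rw [e1]
        have e2 : ((i + 1 : Nat) : Int) + (pvLeadTrue (pvCovered true r) : Int) - 1 = (i : Int) + ((pvLeadTrue (pvCovered true r) + 1 : Nat) : Int) - 1 := by push_cast; ring
        rw [e2]
        simp
      · -- head is not 1: mask head is false, A keeps start = none
        have h2 : pvCovered false (p :: r) = false :: pvCovered false r := by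
          by_cases h0 : p = 0 <;> simp [pvCovered, h1, h0]
        have hA : pvAOut hop (p :: r) i ranges none n = pvAOut hop r (i + 1) ranges none n := by
          by_cases h0 : p = 0 <;> simp [pvAOut, pvALoop, h1, h0]
        rw [hA, (ih (i + 1) ranges n hn').1, h2]
        simp [pvRuns]
    · intro s
      by_cases h0 : p = 0
      · -- close the run: end index i - 1
        have h2 : pvCovered true (p :: r) = false :: pvCovered false r := by
          simp [pvCovered, h0]
        have hA : pvAOut hop (p :: r) i ranges (some s) n =
            pvAOut hop r (i + 1) (ranges ++ [(s, ((i : Int) - 1) * hop)]) none n := by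
          simp [pvAOut, pvALoop, h0]
        rw [hA, (ih (i + 1) (ranges ++ [(s, ((i : Int) - 1) * hop)]) n hn').1, h2]
        simp [pvRuns, pvLeadTrue]
      · -- run stays open: mask head is true
        have h2 : pvCovered true (p :: r) = true :: pvCovered true r := by
          by_cases h1 : p = 1 <;> simp [pvCovered, h1, h0]
        have hA : pvAOut hop (p :: r) i ranges (some s) n = pvAOut hop r (i + 1) ranges (some s) n := by
          by_cases h1 : p = 1 <;> simp [pvAOut, pvALoop, h1, h0]
        rw [hA, (ih (i + 1) ranges n hn').2 s, h2]
        simp only [pvLeadTrue]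
        have e1 : i + 1 + pvLeadTrue (pvCovered true r) = i + (pvLeadTrue (pvCovered true r) + 1) := by omega
        rw [e1]
        have e2 : ((i + 1 : Nat) : Int) + (pvLeadTrue (pvCovered true r) : Int) - 1 = (i : Int) + ((pvLeadTrue (pvCovered true r) + 1 : Nat) : Int) - 1 := by push_cast; ring
        rw [e2]
        simp [List.drop_succ_cons]

-- ===== VERDICT (by name: the statement is the Claim_ definition above) =====
theorem find_predicted_ranges_spec : Claim_equal_find_predicted_ranges := by
  intro predictions hop_length _
  unfold Spec_find_predicted_ranges find_predicted_ranges find_predicted_ranges_alt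
  have h := (pvMain hop_length predictions 0 [] predictions.length (by simp)).1
  simpa [pvAOut] using h
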